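-- pv_equiv track=rewrite | github.com/BenLeong0/AdventOfCode | 2021/day2.py | total_displacement_with_aim
-- ===== SOURCE A (Python) =====
-- from typing import List, Tuple
--
-- def total_displacement_with_aim(movements: List[Tuple[str, int]]) -> int:
--     forwards_displacement = 0
--     vertical_displacement = 0
--     aim = 0
--
--     for (direction, change) in movements:
--         if direction == "forward":
--             forwards_displacement += change
--             vertical_displacement += change * aim
--         elif direction == "down":
--             aim += change
--         elif direction == "up":
--             aim -= change
--
--     return forwards_displacement * vertical_displacement
-- ===== SOURCE B (Python) =====
-- from typing import List, Tuple
--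
-- def total_displacement_with_aim(movements: List[Tuple[str, int]]) -> int:
--     # Pass 1: record the aim in effect when each movement is encountered.
--     aims = []
--     aim = 0
--     for (direction, change) in movements:
--         aims.append(aim)
--         if direction == "down":
--             aim += change
--         elif direction == "up":
--             aim -= change
--     # Pass 2: sum displacements over the forward moves using the recorded aims.
--     forwards_displacement = sum(c for (d, c), _ in zip(movements, aims) if d == "forward")
--     vertical_displacement = sum(c * a for (d, c), a in zip(movements, aims) if d == "forward")
--     return forwards_displacement * vertical_displacement
-- ===== Notes on version B (the rewrite author's own statement) =====
-- stated objective: alternative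
-- what changed: Replaces the single stateful loop with a two-pass decomposition: a prefix pass building the list of aim values in effect at each step, then zip-based sums over the forward moves for the two displacements.
import Mathlib
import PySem

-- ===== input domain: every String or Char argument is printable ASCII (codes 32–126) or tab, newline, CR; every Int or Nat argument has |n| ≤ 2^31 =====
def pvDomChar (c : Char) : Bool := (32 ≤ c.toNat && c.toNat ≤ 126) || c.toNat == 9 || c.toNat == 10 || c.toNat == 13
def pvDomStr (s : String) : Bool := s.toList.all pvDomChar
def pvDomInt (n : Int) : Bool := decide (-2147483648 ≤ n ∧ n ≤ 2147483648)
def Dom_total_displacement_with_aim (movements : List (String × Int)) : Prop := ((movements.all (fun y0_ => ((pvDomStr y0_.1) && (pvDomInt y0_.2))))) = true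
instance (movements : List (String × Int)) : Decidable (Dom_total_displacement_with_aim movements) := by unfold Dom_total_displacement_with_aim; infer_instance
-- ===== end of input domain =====

-- B replaces A's single stateful loop by a two-pass decomposition (aim-prefix list, then zip sums); return values proved equal on all inputs.

-- ===== PORT A =====
-- loop body of A's single for-loop over state (forwards, vertical, aim)
def tdwaStepA (st : Int × Int × Int) (m : String × Int) : Int × Int × Int :=
  if m.1 == "forward" then (st.1 + m.2, st.2.1 + m.2 * st.2.2, st.2.2)
  else if m.1 == "down" then (st.1, st.2.1, st.2.2 + m.2)
  else if m.1 == "up" then (st.1, st.2.1, st.2.2 - m.2)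
  else st

def total_displacement_with_aim (movements : List (String × Int)) : Int :=
  let st := movements.foldl tdwaStepA (0, 0, 0)
  st.1 * st.2.1

-- ===== PORT B =====
-- loop body of B's first pass: append current aim, then update it
def tdwaStepB (st : List Int × Int) (m : String × Int) : List Int × Int :=
  (st.1 ++ [st.2],
   if m.1 == "down" then st.2 + m.2
   else if m.1 == "up" then st.2 - m.2
   else st.2)

def total_displacement_with_aim_alt (movements : List (String × Int)) : Int :=
  let aims := (movements.foldl tdwaStepB ([], 0)).1
  let pairs := movements.zip aims
  let fwd := ((pairs.filter (fun p => p.1.1 == "forward")).map (fun p => p.1.2)).sum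
  let vert := ((pairs.filter (fun p => p.1.1 == "forward")).map (fun p => p.1.2 * p.2)).sum
  fwd * vert

-- ===== PRECONDITION & SPEC =====
def Spec_total_displacement_with_aim (movements : List (String × Int)) (out : Int) : Prop := out = total_displacement_with_aim_alt movements
instance (movements : List (String × Int)) (out : Int) : Decidable (Spec_total_displacement_with_aim movements out) := by unfold Spec_total_displacement_with_aim; infer_instance

-- ===== CLAIM (what is proved, stated in full; the proofs are below) =====
def Claim_equal_total_displacement_with_aim : Prop := ∀ (movements : List (String × Int)), Dom_total_displacement_with_aim movements → Spec_total_displacement_with_aim movements (total_displacement_with_aim movements)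

-- ===== LEMMAS AND PROOFS =====

-- prefix list of aims starting from aim a (proof-side characterisation of B's first pass)
def aimsRec (a : Int) : List (String × Int) → List Int
  | [] => []
  | m :: ms => a :: aimsRec (if m.1 == "down" then a + m.2
                             else if m.1 == "up" then a - m.2 else a) ms

theorem aims_foldl_eq (ms : List (String × Int)) : ∀ (acc : List Int) (a : Int),
    (ms.foldl tdwaStepB (acc, a)).1 = acc ++ aimsRec a ms := by
  induction ms with
  | nil => intro acc a; simp [aimsRec]
  | cons m ms ih =>
      intro acc a
      simp [List.foldl_cons, tdwaStepB, aimsRec, ih]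

-- the two zip-sums of B, as functions of the starting aim
def fwdS (a : Int) (ms : List (String × Int)) : Int :=
  (((ms.zip (aimsRec a ms)).filter (fun p => p.1.1 == "forward")).map (fun p => p.1.2)).sum
def vertS (a : Int) (ms : List (String × Int)) : Int :=
  (((ms.zip (aimsRec a ms)).filter (fun p => p.1.1 == "forward")).map (fun p => p.1.2 * p.2)).sum

theorem foldlA_eq (ms : List (String × Int)) : ∀ (f v a : Int),
    (ms.foldl tdwaStepA (f, v, a)).1 = f + fwdS a ms ∧
    (ms.foldl tdwaStepA (f, v, a)).2.1 = v + vertS a ms := by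
  induction ms with
  | nil => intro f v a; simp [fwdS, vertS, aimsRec]
  | cons m ms ih =>
      intro f v a
      by_cases h1 : m.1 = "forward"
      · obtain ⟨ih1, ih2⟩ := ih (f + m.2) (v + m.2 * a) a
        constructor
        · simp [List.foldl_cons, tdwaStepA, h1, ih1, fwdS, aimsRec]; ring
        · simp [List.foldl_cons, tdwaStepA, h1, ih2, vertS, aimsRec]; ring
      · by_cases h2 : m.1 = "down"
        · obtain ⟨ih1, ih2⟩ := ih f v (a + m.2)
          constructor
          · simp [List.foldl_cons, tdwaStepA, h2, ih1, fwdS, aimsRec]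
          · simp [List.foldl_cons, tdwaStepA, h2, ih2, vertS, aimsRec]
        · by_cases h3 : m.1 = "up"
          · obtain ⟨ih1, ih2⟩ := ih f v (a - m.2)
            constructor
            · simp [List.foldl_cons, tdwaStepA, h3, ih1, fwdS, aimsRec]
            · simp [List.foldl_cons, tdwaStepA, h3, ih2, vertS, aimsRec]
          · obtain ⟨ih1, ih2⟩ := ih f v a
            constructor
            · simp [List.foldl_cons, tdwaStepA, h1, h2, h3, ih1, fwdS, aimsRec]
            · simp [List.foldl_cons, tdwaStepA, h1, h2, h3, ih2, vertS, aimsRec]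

-- ===== VERDICT (by name: the statement is the Claim_ definition above) =====
theorem total_displacement_with_aim_spec : Claim_equal_total_displacement_with_aim := by
  intro ms _
  unfold Spec_total_displacement_with_aim total_displacement_with_aim total_displacement_with_aim_alt
  obtain ⟨h1, h2⟩ := foldlA_eq ms 0 0 0
  simp only [aims_foldl_eq ms [] 0, List.nil_append, h1, h2]
  simp [fwdS, vertS]
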